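-- pv_equiv track=rewrite | github.com/akashvshroff/Puzzles_Challenges | right_truncatable_harshad.py | rthn_between
-- ===== SOURCE A (Python) =====
-- def get_sum(n):
--     sum = 0
--     while(n > 0):
--         sum += int(n % 10)
--         n = int(n/10)
--     return sum
--
-- def is_harshad(n):
--     while n >= 1:
--         if n % get_sum(n) == 0:
--             n = n//10
--             is_harshad(n)
--         else:
--             return False
--     return True
--
-- def rthn_between(a, b):
--     rthn = []
--     for i in range(a, b+1):
--         if i < 10:
--             continue
--         if is_harshad(i):
--             rthn.append(i)
--     return rthn
-- ===== SOURCE B (Python) =====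
-- def rthn_between(a, b):
--     # BFS: generate right-truncatable Harshad numbers by appending digits,
--     # level by level (levels come out in increasing order), filter to [a, b].
--     def digit_sum(n):
--         s = 0
--         while n > 0:
--             s += n % 10
--             n //= 10
--         return s
--
--     result = []
--     level = list(range(1, 10))
--     while level:
--         nxt = []
--         for n in level:
--             for d in range(10):
--                 m = 10 * n + d
--                 if m <= b and m % digit_sum(m) == 0:
--                     nxt.append(m)
--         result.extend(m for m in nxt if m >= a)
--         level = nxt
--     return result
-- ===== Notes on version B (the rewrite author's own statement) =====
-- stated objective: faster
-- what changed: Instead of testing every integer in [a,b] with a per-number truncation loop, B generates all right-truncatable Harshad numbers up to b by BFS digit-appending from the seeds 1..9 (levels come out in increasing order) and filters them to [a,b].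
import Mathlib
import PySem

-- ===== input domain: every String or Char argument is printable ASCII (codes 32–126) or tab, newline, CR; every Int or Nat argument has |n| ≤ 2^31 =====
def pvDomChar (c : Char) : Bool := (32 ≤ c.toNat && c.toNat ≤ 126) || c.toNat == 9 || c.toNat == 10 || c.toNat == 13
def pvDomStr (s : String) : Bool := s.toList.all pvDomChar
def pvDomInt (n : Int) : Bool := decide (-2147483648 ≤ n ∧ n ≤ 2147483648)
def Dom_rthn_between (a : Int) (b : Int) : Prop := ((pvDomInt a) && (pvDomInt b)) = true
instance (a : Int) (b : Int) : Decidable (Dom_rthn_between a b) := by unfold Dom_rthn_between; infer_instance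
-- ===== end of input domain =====

-- B replaces A's per-number test over the whole interval [a,b] by BFS generation of
-- right-truncatable Harshad numbers via digit appending, filtered to [a,b] (objective: faster).

-- ===== PORT A =====
-- get_sum: Python's 'int(n/10)' is float-truncating division = truncdiv (exact: |n| ≤ 2^31 < 2^53)
def getSumA (n : Int) : Int :=
  if h : 0 < n then PySem.Int.mod n 10 + getSumA (PySem.Int.truncdiv n 10) else 0
termination_by n.toNat
decreasing_by
  have : PySem.Int.truncdiv n 10 = n / 10 := by
    simp [PySem.Int.truncdiv, Int.tdiv_eq_ediv, Or.inl (le_of_lt h)]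
  omega

-- is_harshad: the recursive call 'is_harshad(n)' whose result Python discards performs the same
-- computation as the next loop iteration; the loop continuing with n = n//10 is the recursion here
def isHarshadA (n : Int) : Bool :=
  if h : 1 ≤ n then
    if PySem.Int.mod n (getSumA n) = 0 then isHarshadA (PySem.Int.floordiv n 10) else false
  else true
termination_by n.toNat
decreasing_by
  have : PySem.Int.floordiv n 10 = n / 10 := PySem.Int.floordiv_eq_ediv_of_pos (by omega)
  omega

def rthn_between (a : Int) (b : Int) : List Int :=
  (PySem.List.pyRange a (b + 1) 1).foldl
    (fun rthn i =>
      if i < 10 then rthn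
      else if isHarshadA i then rthn ++ [i] else rthn) []

-- ===== PORT B =====
def digitSumB (n : Int) : Int :=
  if h : 0 < n then PySem.Int.mod n 10 + digitSumB (PySem.Int.floordiv n 10) else 0
termination_by n.toNat
decreasing_by
  have : PySem.Int.floordiv n 10 = n / 10 := PySem.Int.floordiv_eq_ediv_of_pos (by omega)
  omega

-- one pass of Source B's 'for n in level: for d in range(10): …' loops, building nxt
def levelStepB (b : Int) (level : List Int) : List Int :=
  level.foldl (fun nxt n =>
    (PySem.List.pyRange 0 10 1).foldl (fun nxt d =>
      let m := 10 * n + d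
      if m ≤ b ∧ PySem.Int.mod m (digitSumB m) = 0 then nxt ++ [m] else nxt) nxt) []

-- Source B's 'while level:' loop; fuel is a totality guard only (level k is empty once 10^k > b,
-- see bfs_main below); each round extends result with the new level filtered to [a, ∞)
def bfsB (a : Int) (b : Int) : Nat → List Int → List Int → List Int
  | 0, _, result => result
  | fuel + 1, level, result =>
    if level = [] then result
    else
      let nxt := levelStepB b level
      bfsB a b fuel nxt (result ++ nxt.filter (fun m => a ≤ m))

def rthn_between_alt (a : Int) (b : Int) : List Int :=
  bfsB a b (b.natAbs + 2) (PySem.List.pyRange 1 10 1) []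

-- ===== PRECONDITION & SPEC =====
def Spec_rthn_between (a : Int) (b : Int) (out : List Int) : Prop := out = rthn_between_alt a b
instance (a : Int) (b : Int) (out : List Int) : Decidable (Spec_rthn_between a b out) := by unfold Spec_rthn_between; infer_instance

-- ===== CLAIM (what is proved, stated in full; the proofs are below) =====
def Claim_equal_rthn_between : Prop := ∀ (a : Int) (b : Int), Dom_rthn_between a b → Spec_rthn_between a b (rthn_between a b)

-- ===== LEMMAS AND PROOFS =====

lemma trunc10_eq_floor10 (n : Int) (h : 0 ≤ n) :
    PySem.Int.truncdiv n 10 = PySem.Int.floordiv n 10 := by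
  simp [PySem.Int.truncdiv, PySem.Int.floordiv, Int.tdiv_eq_ediv, Int.fdiv_eq_ediv, Or.inl h]

lemma digitSumB_eq (n : Int) : digitSumB n = getSumA n := by
  by_cases h : 0 < n
  · rw [digitSumB, getSumA]
    simp only [h, dif_pos]
    rw [trunc10_eq_floor10 n (le_of_lt h)]
    have hlt : (PySem.Int.floordiv n 10).toNat < n.toNat := by
      have : PySem.Int.floordiv n 10 = n / 10 := PySem.Int.floordiv_eq_ediv_of_pos (by omega)
      omega
    have := digitSumB_eq (PySem.Int.floordiv n 10)
    omega
  · rw [digitSumB, getSumA]; simp [h]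
termination_by n.toNat
decreasing_by
  have : PySem.Int.floordiv n 10 = n / 10 := PySem.Int.floordiv_eq_ediv_of_pos (by omega)
  omega

lemma isHarshadA_pos (n : Int) (h : 1 ≤ n) :
    (isHarshadA n = true ↔
      (PySem.Int.mod n (getSumA n) = 0 ∧ isHarshadA (PySem.Int.floordiv n 10) = true)) := by
  rw [isHarshadA]; simp [h]

lemma isHarshadA_zero : isHarshadA 0 = true := by rw [isHarshadA]; simp

lemma isHarshadA_single (m : Int) (h1 : 1 ≤ m) (h2 : m < 10) : isHarshadA m = true := by
  rw [isHarshadA_pos m h1]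
  have hfd : PySem.Int.floordiv m 10 = 0 := by
    rw [PySem.Int.floordiv_eq_ediv_of_pos (by omega)]; omega
  have hgs : getSumA m = m := by
    rw [getSumA]
    simp only [show 0 < m by omega, dif_pos]
    rw [trunc10_eq_floor10 m (by omega), hfd]
    rw [getSumA]
    simp only [show ¬ (0:Int) < 0 by omega, dif_neg, not_false_iff]
    rw [PySem.Int.mod_eq_emod_of_pos (by omega)]
    omega
  refine ⟨?_, by rw [hfd]; exact isHarshadA_zero⟩
  rw [hgs, PySem.Int.mod_eq_emod_of_pos (by omega)]
  exact Int.emod_self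

-- A's output is the filter of the scanned range
lemma rthn_between_eq_filter (a b : Int) :
    rthn_between a b =
      (PySem.List.pyRange a (b + 1) 1).filter
        (fun i => decide (10 ≤ i ∧ isHarshadA i = true)) := by
  unfold rthn_between
  have hf : (fun (rthn : List Int) (i : Int) =>
      if i < 10 then rthn
      else if isHarshadA i then rthn ++ [i] else rthn) =
      (fun rthn i => if (10 ≤ i ∧ isHarshadA i = true) then rthn ++ [i] else rthn) := by
    funext rthn i
    split_ifs with h1 h2 h3 h3 <;> first | rfl | (exfalso; omega) | simp_all
  rw [hf, PySem.List.foldl_append_ite_eq_filter]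
  simp

-- children of one frontier node: closed form of the inner 'for d in range(10)' loop
def chl (b n : Int) : List Int :=
  ((PySem.List.pyRange 0 10 1).filter
    (fun d => decide (10 * n + d ≤ b ∧ PySem.Int.mod (10 * n + d) (digitSumB (10 * n + d)) = 0))).map
    (fun d => 10 * n + d)

lemma levelStepB_eq (b : Int) (L : List Int) : levelStepB b L = L.flatMap (chl b) := by
  unfold levelStepB chl
  have hinner : ∀ (n : Int) (nxt : List Int),
      (PySem.List.pyRange 0 10 1).foldl (fun nxt d =>
        let m := 10 * n + d
        if m ≤ b ∧ PySem.Int.mod m (digitSumB m) = 0 then nxt ++ [m] else nxt) nxt =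
      nxt ++ ((PySem.List.pyRange 0 10 1).filter
        (fun d => decide (10 * n + d ≤ b ∧ PySem.Int.mod (10 * n + d) (digitSumB (10 * n + d)) = 0))).map
        (fun d => 10 * n + d) := by
    intro n nxt
    exact PySem.List.foldl_append_ite
      (fun d => 10 * n + d ≤ b ∧ PySem.Int.mod (10 * n + d) (digitSumB (10 * n + d)) = 0)
      (fun d => 10 * n + d) _ nxt
  simp only [hinner]
  exact PySem.List.foldl_append_eq_flatMap _ L []

lemma mem_chl {b n m : Int} :
    m ∈ chl b n ↔ (10 * n ≤ m ∧ m < 10 * n + 10 ∧ m ≤ b ∧ PySem.Int.mod m (digitSumB m) = 0) := by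
  unfold chl
  simp only [List.mem_map, List.mem_filter, PySem.List.mem_pyRange_one, decide_eq_true_eq]
  constructor
  · rintro ⟨d, ⟨⟨hd0, hd10⟩, hcond⟩, rfl⟩
    exact ⟨by omega, by omega, hcond.1, hcond.2⟩
  · rintro ⟨h1, h2, h3, h4⟩
    exact ⟨m - 10 * n, ⟨⟨by omega, by omega⟩, by simp only [show 10 * n + (m - 10 * n) = m by ring]; exact ⟨h3, h4⟩⟩, by ring⟩

lemma chl_pairwise (b n : Int) : (chl b n).Pairwise (· < ·) := by
  unfold chl
  exact List.Pairwise.map (fun d => 10 * n + d) (fun x y (h : x < y) => show 10 * n + x < 10 * n + y by omega)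
    ((PySem.List.pairwise_lt_pyRange_one 0 10).filter _)

-- invariant of the frontier at level k: exactly the right-truncatable Harshad numbers with
-- k+1 digits (bounded by b for k ≥ 1), in strictly increasing order
def LvlInv (b : Int) (k : Nat) (L : List Int) : Prop :=
  L.Pairwise (· < ·) ∧
  ∀ m, m ∈ L ↔ ((10:Int)^k ≤ m ∧ m < (10:Int)^(k+1) ∧ isHarshadA m = true ∧ (k = 0 ∨ m ≤ b))

lemma step_inv (b : Int) (k : Nat) (L : List Int) (h : LvlInv b k L) :
    LvlInv b (k+1) (levelStepB b L) := by
  obtain ⟨hpw, hmem⟩ := h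
  have hq0 : (0:Int) < 10 ^ k := pow_pos (by norm_num) k
  have hq1 : ((10:Int)^(k+1)) = 10 ^ k * 10 := pow_succ 10 k
  have hq2 : ((10:Int)^(k+2)) = 10 ^ k * 10 * 10 := by rw [pow_succ, pow_succ]
  rw [levelStepB_eq]
  constructor
  · rw [List.pairwise_flatMap]
    refine ⟨fun n _ => chl_pairwise b n, ?_⟩
    refine hpw.imp_of_mem ?_
    intro n n' hn hn' hlt x hx y hy
    have hx' := mem_chl.mp hx
    have hy' := mem_chl.mp hy
    omega
  · intro m
    rw [List.mem_flatMap]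
    constructor
    · rintro ⟨n, hnL, hm⟩
      obtain ⟨hn1, hn2, hnH, _⟩ := (hmem n).mp hnL
      obtain ⟨h1, h2, h3, h4⟩ := mem_chl.mp hm
      have hm1 : (1:Int) ≤ m := by omega
      have hfd : PySem.Int.floordiv m 10 = n := by
        rw [PySem.Int.floordiv_eq_ediv_of_pos (by omega)]; omega
      refine ⟨by omega, by omega, ?_, Or.inr h3⟩
      rw [isHarshadA_pos m hm1, hfd, digitSumB_eq] at *
      exact ⟨h4, hnH⟩
    · rintro ⟨h1, h2, hH, hb'⟩
      have hb2 : m ≤ b := hb'.resolve_left (by omega)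
      have hm1 : (1:Int) ≤ m := by omega
      set n := PySem.Int.floordiv m 10 with hn
      have hfd : n = m / 10 := PySem.Int.floordiv_eq_ediv_of_pos (by omega)
      obtain ⟨hmod, hHn⟩ := (isHarshadA_pos m hm1).mp hH
      refine ⟨n, (hmem n).mpr ⟨by omega, by omega, hHn, Or.inr (by omega)⟩, ?_⟩
      rw [mem_chl, digitSumB_eq]
      refine ⟨by omega, by omega, hb2, hmod⟩

-- every right-truncatable Harshad number ≥ 10^(k+1) has an ancestor at level k
lemma ancestor : ∀ (N : Nat) (x : Int) (k : Nat), x.toNat ≤ N →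
    (10:Int)^(k+1) ≤ x → isHarshadA x = true →
    ∃ y, (10:Int)^k ≤ y ∧ y < (10:Int)^(k+1) ∧ isHarshadA y = true ∧ y ≤ x := by
  intro N
  induction N with
  | zero =>
    intro x k h0 h1 _
    have : (0:Int) < 10 ^ (k+1) := pow_pos (by norm_num) _
    omega
  | succ N ih =>
    intro x k h0 h1 hH
    have hq0 : (0:Int) < 10 ^ k := pow_pos (by norm_num) k
    have hq1 : ((10:Int)^(k+1)) = 10 ^ k * 10 := pow_succ 10 k
    have hq2 : ((10:Int)^(k+2)) = 10 ^ k * 10 * 10 := by rw [pow_succ, pow_succ]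
    have hx1 : (1:Int) ≤ x := by omega
    have hfd : PySem.Int.floordiv x 10 = x / 10 := PySem.Int.floordiv_eq_ediv_of_pos (by omega)
    have hHd : isHarshadA (PySem.Int.floordiv x 10) = true := ((isHarshadA_pos x hx1).mp hH).2
    by_cases hc : x < (10:Int)^(k+2)
    · exact ⟨PySem.Int.floordiv x 10, by omega, by omega, hHd, by omega⟩
    · obtain ⟨y, hy1, hy2, hy3, hy4⟩ := ih (PySem.Int.floordiv x 10) k (by omega) (by omega) hHd
      exact ⟨y, hy1, hy2, hy3, by omega⟩

lemma bfs_main (a b : Int) : ∀ (fuel k : Nat) (L R : List Int),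
    LvlInv b k L → b < (10:Int)^(k + fuel) →
    R.Pairwise (· < ·) → (∀ r ∈ R, r < (10:Int)^(k+1)) →
    (bfsB a b fuel L R).Pairwise (· < ·) ∧
    (∀ x, x ∈ bfsB a b fuel L R ↔
      x ∈ R ∨ (a ≤ x ∧ x ≤ b ∧ (10:Int)^(k+1) ≤ x ∧ isHarshadA x = true)) := by
  intro fuel
  induction fuel with
  | zero =>
    intro k L R _ hfb hR _
    refine ⟨hR, fun x => ?_⟩
    simp only [bfsB]
    have hq1 : ((10:Int)^(k+1)) = 10 ^ k * 10 := pow_succ 10 k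
    have hq0 : (0:Int) < 10 ^ k := pow_pos (by norm_num) k
    rw [Nat.add_zero] at hfb
    constructor
    · exact Or.inl
    · rintro (h | ⟨_, h2, h3, _⟩)
      · exact h
      · omega
  | succ fuel ih =>
    intro k L R hInv hfb hR hRb
    obtain ⟨hpw, hmem⟩ := hInv
    have hq0 : (0:Int) < 10 ^ k := pow_pos (by norm_num) k
    have hq1 : ((10:Int)^(k+1)) = 10 ^ k * 10 := pow_succ 10 k
    have hq2 : ((10:Int)^(k+2)) = 10 ^ k * 10 * 10 := by rw [pow_succ, pow_succ]
    by_cases hL : L = []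
    · subst hL
      simp only [bfsB]
      refine ⟨hR, fun x => ?_⟩
      constructor
      · exact Or.inl
      · rintro (h | ⟨h1, h2, h3, h4⟩)
        · exact h
        · obtain ⟨y, hy1, hy2, hy3, hy4⟩ := ancestor x.toNat x k le_rfl h3 h4
          exact absurd ((hmem y).mpr ⟨hy1, hy2, hy3, Or.inr (by omega)⟩) (List.not_mem_nil)
    · have hstep := step_inv b k L ⟨hpw, hmem⟩
      obtain ⟨hnpw, hnmem⟩ := hstep
      simp only [bfsB, if_neg hL]
      have hfpw : (List.filter (fun m => decide (a ≤ m)) (levelStepB b L)).Pairwise (· < ·) :=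
        hnpw.filter _
      have hR' : (R ++ (levelStepB b L).filter (fun m => decide (a ≤ m))).Pairwise (· < ·) := by
        rw [List.pairwise_append]
        refine ⟨hR, hfpw, fun r hr x hx => ?_⟩
        have hx' := (hnmem x).mp (List.mem_of_mem_filter hx)
        have := hRb r hr
        omega
      have hR'b : ∀ r ∈ R ++ (levelStepB b L).filter (fun m => decide (a ≤ m)),
          r < (10:Int)^(k+1+1) := by
        intro r hr
        rcases List.mem_append.mp hr with h | h
        · have := hRb r h; omega
        · have := (hnmem r).mp (List.mem_of_mem_filter h); omega
      have hfb' : b < (10:Int) ^ (k + 1 + fuel) := by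
        have he : k + 1 + fuel = k + (fuel + 1) := by omega
        rw [he]; exact hfb
      obtain ⟨hc1, hc2⟩ := ih (k+1) (levelStepB b L)
        (R ++ (levelStepB b L).filter (fun m => decide (a ≤ m)))
        ⟨hnpw, hnmem⟩ hfb' hR' hR'b
      refine ⟨hc1, fun x => ?_⟩
      rw [hc2 x, List.mem_append, List.mem_filter]
      have hnx := hnmem x
      constructor
      · rintro ((h | ⟨h1, h2⟩) | ⟨h1, h2, h3, h4⟩)
        · exact Or.inl h
        · obtain ⟨m1, m2, m3, m4⟩ := hnx.mp h1
          have ha : a ≤ x := by simpa using h2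
          exact Or.inr ⟨ha, m4.resolve_left (by omega), by omega, m3⟩
        · exact Or.inr ⟨h1, h2, by omega, h4⟩
      · rintro (h | ⟨h1, h2, h3, h4⟩)
        · exact Or.inl (Or.inl h)
        · by_cases hx2 : x < (10:Int)^(k+2)
          · exact Or.inl (Or.inr ⟨hnx.mpr ⟨h3, hx2, h4, Or.inr h2⟩, by simpa using h1⟩)
          · exact Or.inr ⟨h1, h2, by omega, h4⟩

-- two strictly increasing integer lists with the same members are equal
lemma eq_of_pairwise_lt_of_mem_iff (xs ys : List Int)
    (hx : xs.Pairwise (· < ·)) (hy : ys.Pairwise (· < ·))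
    (h : ∀ m, m ∈ xs ↔ m ∈ ys) : xs = ys := by
  have nx : xs.Nodup := hx.imp ne_of_lt
  have ny : ys.Nodup := hy.imp ne_of_lt
  have hp : xs.Perm ys := (List.perm_ext_iff_of_nodup nx ny).mpr h
  exact PySem.List.eq_of_perm_of_pairwise_le_of_injective (fun x => x)
    (fun _ _ h => h) hp (hx.imp le_of_lt) (hy.imp le_of_lt)

lemma seeds_inv (b : Int) : LvlInv b 0 (PySem.List.pyRange 1 10 1) := by
  refine ⟨PySem.List.pairwise_lt_pyRange_one 1 10, fun m => ?_⟩
  rw [PySem.List.mem_pyRange_one, pow_zero, pow_one]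
  constructor
  · rintro ⟨h1, h2⟩
    exact ⟨h1, h2, isHarshadA_single m h1 h2, Or.inl rfl⟩
  · rintro ⟨h1, h2, _, _⟩
    exact ⟨h1, h2⟩

lemma fuel_enough (b : Int) : b < (10:Int) ^ (0 + (b.natAbs + 2)) := by
  have h1 : b.natAbs < 10 ^ b.natAbs := Nat.lt_pow_self (by norm_num)
  have h2 : (10:Nat) ^ b.natAbs ≤ 10 ^ (b.natAbs + 2) := Nat.pow_le_pow_right (by norm_num) (by omega)
  have h3 : (b.natAbs : Int) < (10:Int) ^ (b.natAbs + 2) := by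
    have : b.natAbs < 10 ^ (b.natAbs + 2) := lt_of_lt_of_le h1 h2
    exact_mod_cast this
  have h4 : b ≤ (b.natAbs : Int) := Int.le_natAbs
  simpa using lt_of_le_of_lt h4 h3

lemma final_eq (a b : Int) : rthn_between a b = rthn_between_alt a b := by
  obtain ⟨hbpw, hbmem⟩ := bfs_main a b (b.natAbs + 2) 0 (PySem.List.pyRange 1 10 1) []
    (seeds_inv b) (fuel_enough b) List.Pairwise.nil (by simp)
  rw [rthn_between_eq_filter]
  unfold rthn_between_alt
  apply eq_of_pairwise_lt_of_mem_iff
  · exact (PySem.List.pairwise_lt_pyRange_one a (b+1)).filter _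
  · exact hbpw
  · intro m
    rw [List.mem_filter, PySem.List.mem_pyRange_one, hbmem m]
    simp only [List.not_mem_nil, false_or, decide_eq_true_eq]
    rw [show ((10:Int)^(0+1)) = 10 from by norm_num]
    constructor
    · rintro ⟨⟨h1, h2⟩, h3, h4⟩
      exact ⟨h1, by omega, h3, h4⟩
    · rintro ⟨h1, h2, h3, h4⟩
      exact ⟨⟨h1, by omega⟩, h3, h4⟩

-- ===== VERDICT (by name: the statement is the Claim_ definition above) =====
theorem rthn_between_spec : Claim_equal_rthn_between := by
  intro a b _
  exact final_eq a b
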